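-- pv_equiv track=rewrite | github.com/newaetech/chipwhisperer-jupyter | tests/docker/testing_server.py | sort_by_failed
-- ===== SOURCE A (Python) =====
-- def sort_by_failed(tests):
--     failed = {}
--     passed = {}
--     build = {}
--     for key in tests.keys():
--         if key.startswith('PASSED'):
--             passed[key] = tests[key]
--         elif key.startswith('FAILED'):
--             failed[key] = tests[key]
--         else:
--             build[key] = tests[key]
--     result = {}
--     result.update(failed)
--     result.update(passed)
--     result.update(build)
--     return result
-- ===== SOURCE B (Python) =====
-- def sort_by_failed(tests):
--     def rank(key):
--         if key.startswith('FAILED'):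
--             return 0
--         if key.startswith('PASSED'):
--             return 1
--         return 2
--     return dict(sorted(tests.items(), key=lambda kv: rank(kv[0])))
-- ===== Notes on version B (the rewrite author's own statement) =====
-- stated objective: alternative
-- what changed: Replaces the three-dict partition-and-update with a single stable sort of the items under a 3-valued rank key (FAILED=0, PASSED=1, else 2), relying on sort stability for the within-group order.
import Mathlib
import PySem

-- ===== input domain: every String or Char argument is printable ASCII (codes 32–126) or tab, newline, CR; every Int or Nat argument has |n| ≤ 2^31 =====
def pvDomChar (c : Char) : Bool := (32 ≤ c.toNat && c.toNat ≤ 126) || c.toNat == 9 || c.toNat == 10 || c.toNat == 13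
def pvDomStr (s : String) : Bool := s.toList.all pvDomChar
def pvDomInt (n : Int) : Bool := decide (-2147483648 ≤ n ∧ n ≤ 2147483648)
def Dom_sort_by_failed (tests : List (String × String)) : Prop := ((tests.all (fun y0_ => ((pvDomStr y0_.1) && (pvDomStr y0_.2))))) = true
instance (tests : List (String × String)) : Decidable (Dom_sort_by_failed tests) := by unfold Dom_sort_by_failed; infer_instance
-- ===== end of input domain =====

-- B replaces A's three-dict partition-and-update with one stable sort of the items by a
-- 3-valued rank key (FAILED=0, PASSED=1, else 2); same result, similar cost.


-- ===== PORT A =====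
-- 'for key in tests.keys(): … tests[key] …' walks the dict's keys in insertion order and looks
-- each one up; under the assoc-list dict convention (unique keys, Pre_) that is exactly a pass
-- over the (key, value) pairs in order, so the loop is ported as a fold over the pairs.
def sort_by_failed (tests : List (String × String)) : List (String × String) :=
  let fpb := tests.foldl
    (fun (fpb : PySem.Dict String String × PySem.Dict String String × PySem.Dict String String) kv =>
      if PySem.Str.startswith kv.1 "PASSED" then (fpb.1, (fpb.2.1).insert kv.1 kv.2, fpb.2.2)
      else if PySem.Str.startswith kv.1 "FAILED" then ((fpb.1).insert kv.1 kv.2, fpb.2.1, fpb.2.2)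
      else (fpb.1, fpb.2.1, (fpb.2.2).insert kv.1 kv.2))
    (PySem.Dict.empty, PySem.Dict.empty, PySem.Dict.empty)
  ((((PySem.Dict.empty).update fpb.1.items).update fpb.2.1.items).update fpb.2.2.items).items

-- ===== PORT B =====
def pyRank (key : String) : Int :=
  if PySem.Str.startswith key "FAILED" then 0
  else if PySem.Str.startswith key "PASSED" then 1
  else 2

def sort_by_failed_alt (tests : List (String × String)) : List (String × String) :=
  (PySem.Dict.ofList (PySem.List.sorted tests (fun kv => pyRank kv.1))).items

-- ===== PRECONDITION & SPEC =====
-- Pre_ requires the keys to be pairwise distinct: the parameter encodes a Python dict, whose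
-- keys are necessarily distinct, so no input the Python A accepts is excluded.
def Pre_sort_by_failed (tests : List (String × String)) : Prop := (tests.map Prod.fst).Nodup
instance (tests : List (String × String)) : Decidable (Pre_sort_by_failed tests) := by unfold Pre_sort_by_failed; infer_instance
def pvWitness_sort_by_failed : (List (String × String)) :=
  [("build", "ok"), ("FAILED: t1", "boom"), ("PASSED: t2", "fine"), ("FAILED: t3", "bad")]
def Spec_sort_by_failed (tests : List (String × String)) (out : List (String × String)) : Prop := out = sort_by_failed_alt tests
instance (tests : List (String × String)) (out : List (String × String)) : Decidable (Spec_sort_by_failed tests out) := by unfold Spec_sort_by_failed; infer_instance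

-- ===== CLAIM (what is proved, stated in full; the proofs are below) =====
def Claim_equal_sort_by_failed : Prop := ∀ (tests : List (String × String)), Dom_sort_by_failed tests → Pre_sort_by_failed tests → Spec_sort_by_failed tests (sort_by_failed tests)

-- ===== LEMMAS AND PROOFS =====

lemma excl (k : String) (h : PySem.Str.startswith k "PASSED" = true) :
    PySem.Str.startswith k "FAILED" = false := by
  simp only [PySem.Str.startswith, PySem.Chars.startswith] at *
  cases hk : k.toList with
  | nil => simp [hk] at h
  | cons c cs =>
    rw [hk] at h
    simp [show ("PASSED".toList) = ['P','A','S','S','E','D'] from rfl, List.isPrefixOf] at h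
    rw [← h.1]
    simp [show ("FAILED".toList) = ['F','A','I','L','E','D'] from rfl, List.isPrefixOf]

lemma update_items (ps : List (String × String)) (d : PySem.Dict String String)
    (hnd : (ps.map Prod.fst).Nodup)
    (hdis : ∀ k ∈ ps.map Prod.fst, d.contains k = false) :
    (d.update ps).items = d.items ++ ps := by
  induction ps generalizing d with
  | nil => simp [PySem.Dict.update]
  | cons kv rest ih =>
    simp only [List.map_cons, List.nodup_cons] at hnd
    have hc : d.contains kv.1 = false := hdis kv.1 (by simp)
    have hins : (d.insert kv.1 kv.2).items = d.items ++ [(kv.1, kv.2)] := by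
      simp [PySem.Dict.insert, hc]
    have : (d.update (kv :: rest)) = (d.insert kv.1 kv.2).update rest := rfl
    rw [this, ih _ hnd.2]
    · simp [hins]
    · intro k hk
      rw [PySem.Dict.contains_insert]
      have h1 : (k == kv.1) = false := by
        simp only [beq_eq_false_iff_ne, ne_eq]
        intro he; exact hnd.1 (he ▸ hk)
      rw [h1, hdis k (by simp [hk])]
      rfl

def keyF (kv : String × String) : Bool := PySem.Str.startswith kv.1 "FAILED"
def keyP (kv : String × String) : Bool := PySem.Str.startswith kv.1 "PASSED"
def flF (t : List (String × String)) : List (String × String) := t.filter keyF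
def flP (t : List (String × String)) : List (String × String) := t.filter keyP
def flB (t : List (String × String)) : List (String × String) := t.filter (fun kv => !keyF kv && !keyP kv)

lemma foldA (t : List (String × String))
    (df dp db : PySem.Dict String String) :
    t.foldl
      (fun (fpb : PySem.Dict String String × PySem.Dict String String × PySem.Dict String String) kv =>
        if PySem.Str.startswith kv.1 "PASSED" then (fpb.1, (fpb.2.1).insert kv.1 kv.2, fpb.2.2)
        else if PySem.Str.startswith kv.1 "FAILED" then ((fpb.1).insert kv.1 kv.2, fpb.2.1, fpb.2.2)
        else (fpb.1, fpb.2.1, (fpb.2.2).insert kv.1 kv.2))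
      (df, dp, db)
    = (df.update (flF t), dp.update (flP t), db.update (flB t)) := by
  induction t generalizing df dp db with
  | nil => rfl
  | cons kv rest ih =>
    by_cases hp : PySem.Str.startswith kv.1 "PASSED" = true
    · have hf : PySem.Str.startswith kv.1 "FAILED" = false := excl kv.1 hp
      have e1 : flF (kv :: rest) = flF rest :=
        List.filter_cons_of_neg (by unfold keyF; rw [hf]; decide)
      have e2 : flP (kv :: rest) = kv :: flP rest :=
        List.filter_cons_of_pos (by unfold keyP; rw [hp])
      have e3 : flB (kv :: rest) = flB rest :=
        List.filter_cons_of_neg (by unfold keyF keyP; rw [hp, hf]; decide)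
      simp only [List.foldl_cons, hp, if_true, e1, e2, e3]
      exact ih df (dp.insert kv.1 kv.2) db
    · by_cases hf : PySem.Str.startswith kv.1 "FAILED" = true
      · have hp' : PySem.Str.startswith kv.1 "PASSED" = false := by
          cases h : PySem.Str.startswith kv.1 "PASSED" with
          | false => rfl
          | true => exact absurd h hp
        have e1 : flF (kv :: rest) = kv :: flF rest :=
          List.filter_cons_of_pos (by unfold keyF; rw [hf])
        have e2 : flP (kv :: rest) = flP rest :=
          List.filter_cons_of_neg (by unfold keyP; rw [hp']; decide)
        have e3 : flB (kv :: rest) = flB rest :=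
          List.filter_cons_of_neg (by unfold keyF keyP; rw [hp', hf]; decide)
        simp only [List.foldl_cons, hp, hf, if_true, e1, e2, e3]
        exact ih (df.insert kv.1 kv.2) dp db
      · have hp' : PySem.Str.startswith kv.1 "PASSED" = false := by
          cases h : PySem.Str.startswith kv.1 "PASSED" with
          | false => rfl
          | true => exact absurd h hp
        have hf' : PySem.Str.startswith kv.1 "FAILED" = false := by
          cases h : PySem.Str.startswith kv.1 "FAILED" with
          | false => rfl
          | true => exact absurd h hf
        have e1 : flF (kv :: rest) = flF rest :=
          List.filter_cons_of_neg (by unfold keyF; rw [hf']; decide)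
        have e2 : flP (kv :: rest) = flP rest :=
          List.filter_cons_of_neg (by unfold keyP; rw [hp']; decide)
        have e3 : flB (kv :: rest) = kv :: flB rest :=
          List.filter_cons_of_pos (by unfold keyF keyP; rw [hp', hf']; decide)
        simp only [List.foldl_cons, hp, hf, e1, e2, e3]
        exact ih df dp (db.insert kv.1 kv.2)

lemma insertBy_grouped {α : Type} (before : α → α → Bool) (x : α) (l1 l2 : List α)
    (h1 : ∀ y ∈ l1, before x y = false) (h2 : ∀ y ∈ l2, before x y = true) :
    PySem.List.insertBy before x (l1 ++ l2) = l1 ++ x :: l2 := by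
  induction l1 with
  | nil =>
    cases l2 with
    | nil => simp [PySem.List.insertBy]
    | cons y ys => simp [PySem.List.insertBy, h2 y (by simp)]
  | cons a l1 ih =>
    simp only [List.cons_append, PySem.List.insertBy, h1 a (by simp), Bool.false_eq_true, if_false]
    rw [ih (fun y hy => h1 y (by simp [hy])) ]

lemma rank_of_keyF {kv : String × String} (h : keyF kv = true) : pyRank kv.1 = 0 := by
  unfold keyF at h; unfold pyRank; rw [h]; rfl

lemma rank_of_keyP {kv : String × String} (h : keyP kv = true) : pyRank kv.1 = 1 := by
  unfold keyP at h; unfold pyRank; rw [excl kv.1 h, h]; rfl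

lemma rank_of_keyB {kv : String × String} (hF : keyF kv = false) (hP : keyP kv = false) :
    pyRank kv.1 = 2 := by
  unfold keyF at hF; unfold keyP at hP; unfold pyRank; rw [hF, hP]; rfl

lemma excl_keyP_of_keyF {kv : String × String} (h : keyF kv = true) : keyP kv = false := by
  unfold keyF at h; unfold keyP
  cases hp : PySem.Str.startswith kv.1 "PASSED" with
  | false => rfl
  | true => rw [excl kv.1 hp] at h; cases h

lemma sortB (t : List (String × String)) :
    PySem.List.sorted t (fun kv => pyRank kv.1) = flF t ++ flP t ++ flB t := by
  rw [PySem.List.sorted_eq_foldl_insertBy]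
  induction t using List.reverseRecOn with
  | nil => rfl
  | append_singleton t x ih =>
    rw [List.foldl_append, List.foldl_cons, List.foldl_nil, ih]
    have hFx : flF (t ++ [x]) = flF t ++ List.filter keyF [x] := List.filter_append _ _
    have hPx : flP (t ++ [x]) = flP t ++ List.filter keyP [x] := List.filter_append _ _
    have hBx : flB (t ++ [x]) = flB t ++ List.filter (fun kv => !keyF kv && !keyP kv) [x] :=
      List.filter_append _ _
    have hmF : ∀ y ∈ flF t, pyRank y.1 = 0 := fun y hy => rank_of_keyF (List.mem_filter.mp hy).2
    have hmP : ∀ y ∈ flP t, pyRank y.1 = 1 := fun y hy => rank_of_keyP (List.mem_filter.mp hy).2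
    have hmB : ∀ y ∈ flB t, pyRank y.1 = 2 := by
      intro y hy
      have h2 := (List.mem_filter.mp hy).2
      simp only [Bool.and_eq_true, Bool.not_eq_eq_eq_not, Bool.not_true] at h2
      exact rank_of_keyB h2.1 h2.2
    by_cases hF : keyF x = true
    · have hrx := rank_of_keyF hF
      rw [List.append_assoc,
        insertBy_grouped (fun a b => decide (pyRank a.1 < pyRank b.1)) x (flF t) (flP t ++ flB t)
          (by intro y hy; simp [hrx, hmF y hy])
          (by intro y hy
              rcases List.mem_append.mp hy with h | h
              · simp [hrx, hmP y h]
              · simp [hrx, hmB y h])]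
      have hfx : List.filter keyF [x] = [x] := by simp [hF]
      have hpx : List.filter keyP [x] = [] := by simp [excl_keyP_of_keyF hF]
      have hbx : List.filter (fun kv => !keyF kv && !keyP kv) [x] = [] := by simp [hF]
      rw [hFx, hPx, hBx, hfx, hpx, hbx]
      simp
    · have hF' : keyF x = false := by
        cases h : keyF x with
        | false => rfl
        | true => exact absurd h hF
      by_cases hP : keyP x = true
      · have hrx := rank_of_keyP hP
        rw [insertBy_grouped (fun a b => decide (pyRank a.1 < pyRank b.1)) x (flF t ++ flP t) (flB t)
            (by intro y hy
                rcases List.mem_append.mp hy with h | h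
                · simp [hrx, hmF y h]
                · simp [hrx, hmP y h])
            (by intro y hy; simp [hrx, hmB y hy])]
        have hfx : List.filter keyF [x] = [] := by simp [hF']
        have hpx : List.filter keyP [x] = [x] := by simp [hP]
        have hbx : List.filter (fun kv => !keyF kv && !keyP kv) [x] = [] := by simp [hP]
        rw [hFx, hPx, hBx, hfx, hpx, hbx]
        simp
      · have hP' : keyP x = false := by
          cases h : keyP x with
          | false => rfl
          | true => exact absurd h hP
        have hrx := rank_of_keyB hF' hP'
        rw [show flF t ++ flP t ++ flB t = (flF t ++ flP t ++ flB t) ++ [] by simp,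
          insertBy_grouped (fun a b => decide (pyRank a.1 < pyRank b.1)) x (flF t ++ flP t ++ flB t) []
            (by intro y hy
                rcases List.mem_append.mp hy with h | h
                · rcases List.mem_append.mp h with h' | h'
                  · simp [hrx, hmF y h']
                  · simp [hrx, hmP y h']
                · simp [hrx, hmB y h])
            (by intro y hy; cases hy)]
        have hfx : List.filter keyF [x] = [] := by simp [hF']
        have hpx : List.filter keyP [x] = [] := by simp [hP']
        have hbx : List.filter (fun kv => !keyF kv && !keyP kv) [x] = [x] := by
          simp [hF', hP']
        rw [hFx, hPx, hBx, hfx, hpx, hbx]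
        simp

lemma contains_false_of_not_mem (d : PySem.Dict String String) (k : String)
    (h : k ∉ d.keys) : d.contains k = false :=
  Bool.eq_false_iff.mpr (fun hc => h ((PySem.Dict.contains_iff_mem_keys d k).mp hc))

lemma startswith_of_mem_keys_filter {t : List (String × String)} {p : (String × String) → Bool}
    {k : String} (h : k ∈ (t.filter p).map Prod.fst) : ∃ kv ∈ t, kv.1 = k ∧ p kv = true := by
  obtain ⟨kv, hkv, hk⟩ := List.mem_map.mp h
  exact ⟨kv, (List.mem_filter.mp hkv).1, hk, (List.mem_filter.mp hkv).2⟩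

theorem sort_by_failed_spec' (tests : List (String × String))
    (hnd : Pre_sort_by_failed tests) :
    Spec_sort_by_failed tests (sort_by_failed tests) := by
  unfold Pre_sort_by_failed at hnd
  unfold Spec_sort_by_failed sort_by_failed sort_by_failed_alt
  have ndF : ((flF tests).map Prod.fst).Nodup := hnd.sublist (List.Sublist.map _ List.filter_sublist)
  have ndP : ((flP tests).map Prod.fst).Nodup := hnd.sublist (List.Sublist.map _ List.filter_sublist)
  have ndB : ((flB tests).map Prod.fst).Nodup := hnd.sublist (List.Sublist.map _ List.filter_sublist)
  have hperm : (flF tests ++ flP tests ++ flB tests).Perm tests := by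
    rw [← sortB]; exact PySem.List.sorted_perm tests _ _
  have ndAll : ((flF tests ++ flP tests ++ flB tests).map Prod.fst).Nodup :=
    ((hperm.map Prod.fst).nodup_iff).mpr hnd
  have hempty : ∀ k : String, (PySem.Dict.empty : PySem.Dict String String).contains k = false :=
    fun _ => rfl
  -- A's chain of updates
  have i1 : ((PySem.Dict.empty : PySem.Dict String String).update (flF tests)).items = flF tests := by
    rw [update_items _ _ ndF (fun k _ => hempty k)]; rfl
  have i1P : ((PySem.Dict.empty : PySem.Dict String String).update (flP tests)).items = flP tests := by
    rw [update_items _ _ ndP (fun k _ => hempty k)]; rfl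
  have i1B : ((PySem.Dict.empty : PySem.Dict String String).update (flB tests)).items = flB tests := by
    rw [update_items _ _ ndB (fun k _ => hempty k)]; rfl
  have i2 : (((PySem.Dict.empty : PySem.Dict String String).update (flF tests)).update (flP tests)).items
      = flF tests ++ flP tests := by
    rw [update_items _ _ ndP, i1]
    intro k hk
    apply contains_false_of_not_mem
    unfold PySem.Dict.keys
    rw [i1]
    intro hmem
    obtain ⟨kv, _, hk1, hF⟩ := startswith_of_mem_keys_filter hmem
    obtain ⟨kv', _, hk1', hP⟩ := startswith_of_mem_keys_filter hk
    unfold keyF at hF; unfold keyP at hP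
    rw [hk1] at hF; rw [hk1'] at hP
    rw [excl k hP] at hF; cases hF
  have i3 : ((((PySem.Dict.empty : PySem.Dict String String).update (flF tests)).update (flP tests)).update (flB tests)).items
      = flF tests ++ flP tests ++ flB tests := by
    rw [update_items _ _ ndB, i2]
    intro k hk
    apply contains_false_of_not_mem
    unfold PySem.Dict.keys
    rw [i2]
    intro hmem
    obtain ⟨kv', _, hk1', hB⟩ := startswith_of_mem_keys_filter hk
    simp only [Bool.and_eq_true, Bool.not_eq_eq_eq_not, Bool.not_true] at hB
    rw [List.map_append] at hmem
    rcases List.mem_append.mp hmem with h | h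
    · obtain ⟨kv, _, hk1, hF⟩ := startswith_of_mem_keys_filter h
      unfold keyF at hF hB; rw [hk1] at hF; rw [hk1'] at hB
      rw [hB.1] at hF; cases hF
    · obtain ⟨kv, _, hk1, hP⟩ := startswith_of_mem_keys_filter h
      unfold keyP at hP hB; rw [hk1] at hP; rw [hk1'] at hB
      rw [hB.2] at hP; cases hP
  simp only [foldA]
  rw [i1, i1P, i1B, i3, sortB]
  unfold PySem.Dict.ofList
  rw [update_items _ _ ndAll (fun k _ => hempty k)]
  rfl

-- ===== VERDICT (by name: the statement is the Claim_ definition above) =====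
theorem sort_by_failed_spec : Claim_equal_sort_by_failed :=
  fun tests _ hnd => sort_by_failed_spec' tests hnd
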